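-- pv_equiv track=rewrite | github.com/dalphonorechi/10Challenges | main.py | censor_card
-- ===== SOURCE A (Python) =====
-- def censor_card(string):
--     b = [i for i in string]
--     c = ""
--     for i in range(0, len(string) - 4):
--         b[i] = "X"
--
--     for i in b:
--         c += i
--
--     return c
-- ===== SOURCE B (Python) =====
-- def censor_card(string):
--     return "X" * (len(string) - 4) + string[-4:]
-- ===== Notes on version B (the rewrite author's own statement) =====
-- stated objective: idiomatic
-- what changed: Replaced the char-list copy, index loop mutating it, and character-by-character string rebuild with a single closed-form expression: string repetition plus a [-4:] slice.
import Mathlib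
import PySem

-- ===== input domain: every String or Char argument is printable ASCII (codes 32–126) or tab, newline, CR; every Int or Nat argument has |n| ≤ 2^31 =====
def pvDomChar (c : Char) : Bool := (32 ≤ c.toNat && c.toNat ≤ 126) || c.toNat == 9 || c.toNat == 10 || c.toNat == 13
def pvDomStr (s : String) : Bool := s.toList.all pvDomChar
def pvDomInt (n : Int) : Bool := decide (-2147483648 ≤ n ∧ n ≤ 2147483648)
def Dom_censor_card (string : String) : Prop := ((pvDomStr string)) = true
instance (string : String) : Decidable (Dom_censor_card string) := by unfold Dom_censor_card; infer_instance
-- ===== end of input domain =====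

-- B replaces A's char-list copy + index loop + char-by-char rebuild with one closed-form
-- expression ("X" * (len-4) + string[-4:]); objective: idiomatic.


-- ===== PORT A =====
-- b = [i for i in string]; for i in range(0, len(string)-4): b[i] = "X"; c = ""; for i in b: c += i
def censor_card (string : String) : String :=
  let b := string.toList
  let b := (PySem.List.pyRange 0 ((PySem.Str.len string) - 4) 1).foldl
      (fun acc i => acc.set i.toNat 'X') b
  String.ofList (b.foldl (fun c ch => c ++ [ch]) [])

-- ===== PORT B =====
-- return "X" * (len(string) - 4) + string[-4:]
def censor_card_alt (string : String) : String :=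
  String.ofList (PySem.List.pyRepeat ['X'] ((PySem.Str.len string) - 4)
    ++ PySem.List.slice string.toList (some (-4)) none)

-- ===== PRECONDITION & SPEC =====
def Spec_censor_card (string : String) (out : String) : Prop := out = censor_card_alt string
instance (string : String) (out : String) : Decidable (Spec_censor_card string out) := by unfold Spec_censor_card; infer_instance

-- ===== CLAIM (what is proved, stated in full; the proofs are below) =====
def Claim_equal_censor_card : Prop := ∀ (string : String), Dom_censor_card string → Spec_censor_card string (censor_card string)

-- ===== LEMMAS AND PROOFS =====

-- A's marking loop over range(0, n) turns the first n characters into 'X'.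
theorem censor_set_loop (l : List Char) (n : Nat) (hn : n ≤ l.length) :
    (PySem.List.pyRange 0 (n : Int) 1).foldl (fun acc i => acc.set i.toNat 'X') l
      = List.replicate n 'X' ++ l.drop n := by
  induction n with
  | zero => simp [PySem.List.pyRange_one_eq_nil]
  | succ n ih =>
    have h1 : ((n : Int) + 1) = ((n + 1 : Nat) : Int) := by push_cast; ring
    have h2 := PySem.List.pyRange_one_succ_right (a := 0) (b := (n : Int)) (by positivity)
    rw [← h1, h2, List.foldl_append, ih (by omega)]
    simp only [List.foldl_cons, List.foldl_nil]
    have hlen : (List.replicate n 'X').length = n := by simp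
    have hset : (List.replicate n 'X' ++ l.drop n).set n 'X'
        = List.replicate n 'X' ++ (l.drop n).set 0 'X' := by
      have h := List.set_append_right (s := List.replicate n 'X') (t := l.drop n)
        (x := 'X') (i := n) (by simp)
      simp only [List.length_replicate, Nat.sub_self] at h
      exact h
    have hdrop : (l.drop n).set 0 'X' = 'X' :: l.drop (n + 1) := by
      have : l.drop n = l[n] :: l.drop (n + 1) := List.drop_eq_getElem_cons (by omega)
      rw [this]; rfl
    simp only [Int.toNat_natCast, hset, hdrop]
    rw [List.replicate_succ']
    simp

theorem censor_core (l : List Char) :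
    (PySem.List.pyRange 0 ((l.length : Int) - 4) 1).foldl (fun acc i => acc.set i.toNat 'X') l
      = PySem.List.pyRepeat ['X'] ((l.length : Int) - 4)
        ++ PySem.List.slice l (some (-4)) none := by
  rw [PySem.List.pyRepeat_singleton,
      PySem.List.slice_from_neg_ofNat l 4 (by norm_num)]
  by_cases h : 4 ≤ l.length
  · have hcast : ((l.length : Int) - 4) = ((l.length - 4 : Nat) : Int) := by omega
    rw [hcast, censor_set_loop l (l.length - 4) (by omega)]
    simp
  · have hle : (l.length : Int) - 4 ≤ 0 := by omega
    rw [PySem.List.pyRange_one_eq_nil hle]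
    have : ((l.length : Int) - 4).toNat = 0 := by omega
    have h0 : l.length - 4 = 0 := by omega
    simp [this, h0]

-- ===== VERDICT (by name: the statement is the Claim_ definition above) =====
theorem censor_card_spec : Claim_equal_censor_card := by
  intro s _
  unfold Spec_censor_card censor_card censor_card_alt
  simp only [PySem.List.foldl_append_singleton, List.nil_append, PySem.Str.len]
  rw [censor_core s.toList]
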